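-- pv_equiv track=rewrite | github.com/oratiek/py-tetris | tetris.py | get_left_blocks
-- ===== SOURCE A (Python) =====
-- def get_left_blocks(active_mino):
--     # 最も左にあるブロックのインデックスを返す(左の壁かブロックに衝突する可能性があるもの)
--     # 一番columnが小さいところ
--     smallest_column = None
--     left_blocks = []
--     for block in active_mino:
--         row = block[0]
--         column = block[1]
--         if smallest_column == None: # first commit
--             smallest_column = column
--             left_blocks.append([row,column])
--         else:
--             if column == smallest_column:
--                 smallest_column = column
--                 left_blocks.append([row, column])
--             if column < smallest_column:
--                 smallest_column = column
--                 left_blocks = []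
--                 left_blocks.append([row, column])
--
--     return left_blocks
-- ===== SOURCE B (Python) =====
-- def get_left_blocks(active_mino):
--     if not active_mino:
--         return []
--     min_col = min(block[1] for block in active_mino)
--     return [[block[0], block[1]] for block in active_mino if block[1] == min_col]
-- ===== Notes on version B (the rewrite author's own statement) =====
-- stated objective: simpler
-- what changed: Replaced A's single-pass running-minimum loop with reset-on-new-minimum by a two-pass decomposition: compute the minimum column once, then filter the blocks with that column.
import Mathlib
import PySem

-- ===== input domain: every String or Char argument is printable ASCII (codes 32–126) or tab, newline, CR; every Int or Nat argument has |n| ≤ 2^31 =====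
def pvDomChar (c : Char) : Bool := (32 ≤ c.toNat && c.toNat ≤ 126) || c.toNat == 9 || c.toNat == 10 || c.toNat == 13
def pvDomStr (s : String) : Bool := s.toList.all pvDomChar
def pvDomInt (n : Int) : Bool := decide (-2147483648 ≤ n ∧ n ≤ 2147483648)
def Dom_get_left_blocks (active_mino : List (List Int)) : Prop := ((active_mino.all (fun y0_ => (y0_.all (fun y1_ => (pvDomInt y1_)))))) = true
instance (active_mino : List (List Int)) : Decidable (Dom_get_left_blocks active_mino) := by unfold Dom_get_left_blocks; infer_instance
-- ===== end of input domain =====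

-- B replaces A's running-minimum loop (with reset) by "compute min column, then filter";
-- same return value on every input where A returns (blocks with at least 2 entries).

-- ===== PORT A =====
-- one loop step: smallest_column is st.1 (None = none), left_blocks is st.2
def glbStepA (st : Option Int × List (List Int)) (block : List Int) :
    Option Int × List (List Int) :=
  let row := PySem.List.pyGetD block 0 0
  let column := PySem.List.pyGetD block 1 0
  match st.1 with
  | none => (some column, st.2 ++ [[row, column]])
  | some sc =>
    -- first if: column == smallest_column
    let sc1 := if column = sc then column else sc
    let lb1 := if column = sc then st.2 ++ [[row, column]] else st.2
    -- second if: column < smallest_column (sc1 = sc at this point unless column = sc)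
    if column < sc1 then (some column, [[row, column]]) else (some sc1, lb1)

def get_left_blocks (active_mino : List (List Int)) : List (List Int) :=
  (active_mino.foldl glbStepA (none, [])).2

-- ===== PORT B =====
def get_left_blocks_alt (active_mino : List (List Int)) : List (List Int) :=
  if active_mino = [] then []
  else
    let min_col := (PySem.List.min? (active_mino.map (fun b => PySem.List.pyGetD b 1 0)) id).getD 0
    (active_mino.filter (fun b => PySem.List.pyGetD b 1 0 = min_col)).map
      (fun b => [PySem.List.pyGetD b 0 0, PySem.List.pyGetD b 1 0])

-- ===== PRECONDITION & SPEC =====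
-- A raises IndexError (block[1]) when some block has fewer than 2 entries; B raises there too.
def Pre_get_left_blocks (active_mino : List (List Int)) : Prop :=
  ∀ b ∈ active_mino, 2 ≤ b.length
instance (active_mino : List (List Int)) : Decidable (Pre_get_left_blocks active_mino) := by
  unfold Pre_get_left_blocks; infer_instance
def pvWitness_get_left_blocks : List (List Int) := [[0, 2], [1, 1], [2, 1]]

def Spec_get_left_blocks (active_mino : List (List Int)) (out : List (List Int)) : Prop := out = get_left_blocks_alt active_mino
instance (active_mino : List (List Int)) (out : List (List Int)) : Decidable (Spec_get_left_blocks active_mino out) := by unfold Spec_get_left_blocks; infer_instance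

-- ===== CLAIM (what is proved, stated in full; the proofs are below) =====
def Claim_equal_get_left_blocks : Prop := ∀ (active_mino : List (List Int)), Dom_get_left_blocks active_mino → Pre_get_left_blocks active_mino → Spec_get_left_blocks active_mino (get_left_blocks active_mino)

-- ===== LEMMAS AND PROOFS =====
-- abbreviations used only in proofs
def glbCol (b : List Int) : Int := PySem.List.pyGetD b 1 0
def glbPair (b : List Int) : List Int := [PySem.List.pyGetD b 0 0, PySem.List.pyGetD b 1 0]

theorem glb_foldl_min_le (cs : List Int) : ∀ x : Int, cs.foldl min x ≤ x := by
  induction cs with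
  | nil => simp
  | cons c cs ih => intro x; simpa using le_trans (ih (min x c)) (min_le_left _ _)

-- loop invariant: folding from state (some m, L) over t yields the global min M and
-- (if M = m then L else []) ++ the pairs of t whose column is M
theorem glb_loop (t : List (List Int)) : ∀ (m : Int) (L : List (List Int)),
    t.foldl glbStepA (some m, L) =
      (some ((t.map glbCol).foldl min m),
       (if (t.map glbCol).foldl min m = m then L else []) ++
         (t.filter (fun b => glbCol b = (t.map glbCol).foldl min m)).map glbPair) := by
  induction t with
  | nil => intro m L; simp
  | cons b t ih =>
    intro m L
    have hc : PySem.List.pyGetD b 1 0 = glbCol b := rfl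
    have hp : [PySem.List.pyGetD b 0 0, glbCol b] = glbPair b := rfl
    rcases lt_trichotomy (glbCol b) m with hlt | heq | hgt
    · have hne : ¬ glbCol b = m := ne_of_lt hlt
      have hne' : ¬ PySem.List.pyGetD b 1 0 = m := by rw [hc]; exact hne
      have hlt' : PySem.List.pyGetD b 1 0 < m := by rw [hc]; exact hlt
      have hstep : glbStepA (some m, L) b = (some (glbCol b), [glbPair b]) := by
        simp only [glbStepA, if_neg hne', if_pos hlt']; rfl
      rw [List.foldl_cons, hstep, ih]
      have hmin : min m (glbCol b) = glbCol b := by omega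
      have hMle := glb_foldl_min_le (t.map glbCol) (glbCol b)
      simp only [List.map_cons, List.foldl_cons, hmin, List.filter_cons]
      by_cases hbM : glbCol b = (t.map glbCol).foldl min (glbCol b)
      · have h1 : (t.map glbCol).foldl min (glbCol b) = glbCol b := hbM.symm
        have h2 : ¬ (t.map glbCol).foldl min (glbCol b) = m := by omega
        simp [h1, h2, hne]
      · have h3 : (t.map glbCol).foldl min (glbCol b) < glbCol b :=
          lt_of_le_of_ne hMle (fun h => hbM h.symm)
        have h4 : ¬ (t.map glbCol).foldl min (glbCol b) = m := by omega
        have h6 : ¬ (t.map glbCol).foldl min (glbCol b) = glbCol b := ne_of_lt h3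
        simp [hbM, h4, h6]
    · have hstep : glbStepA (some m, L) b = (some m, L ++ [glbPair b]) := by
        simp only [glbStepA, heq]
        simp [glbPair, hc, heq]
      rw [List.foldl_cons, hstep, ih]
      have hmin : min m (glbCol b) = m := by omega
      simp only [List.map_cons, List.foldl_cons, hmin, List.filter_cons]
      by_cases hM' : (t.map glbCol).foldl min m = m
      · have : glbCol b = (t.map glbCol).foldl min m := by omega
        simp [hM', this]
      · have : ¬ glbCol b = (t.map glbCol).foldl min m := by
          rw [heq]; exact fun h => hM' h.symm
        simp [hM', this]
    · have hne : ¬ glbCol b = m := by omega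
      have hnlt : ¬ glbCol b < m := by omega
      have hne' : ¬ PySem.List.pyGetD b 1 0 = m := by rw [hc]; exact hne
      have hnlt' : ¬ PySem.List.pyGetD b 1 0 < m := by rw [hc]; exact hnlt
      have hstep : glbStepA (some m, L) b = (some m, L) := by
        simp only [glbStepA, if_neg hne', if_neg hnlt']
      rw [List.foldl_cons, hstep, ih]
      have hmin : min m (glbCol b) = m := by omega
      have hMle := glb_foldl_min_le (t.map glbCol) m
      have h5 : ¬ glbCol b = (t.map glbCol).foldl min m := by omega
      simp [hmin, h5]

theorem glb_min?_some (cs : List Int) : ∀ c : Int,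
    PySem.List.min? (c :: cs) (fun x => x) = some (cs.foldl min c) := by
  induction cs with
  | nil => intro c; simp [PySem.List.min?]
  | cons d ds ih =>
    intro c
    simp only [PySem.List.min?, List.foldl_cons] at *
    by_cases h : d < c
    · have hm : min c d = d := by omega
      simpa [h, hm] using ih d
    · have hm : min c d = c := by omega
      simpa [h, hm] using ih c

-- B's min over a nonempty list is the fold of 'min' over the mapped columns
theorem glb_min_eq (b : List Int) (t : List (List Int)) :
    (PySem.List.min? ((b :: t).map glbCol) id).getD 0 = (t.map glbCol).foldl min (glbCol b) := by
  have : PySem.List.min? (glbCol b :: t.map glbCol) (fun x => x) =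
      some ((t.map glbCol).foldl min (glbCol b)) := glb_min?_some (t.map glbCol) (glbCol b)
  simp only [List.map_cons]
  rw [show (id : Int → Int) = (fun x => x) from rfl, this]
  rfl

-- ===== VERDICT (by name: the statement is the Claim_ definition above) =====
theorem get_left_blocks_spec : Claim_equal_get_left_blocks := by
  intro am _ _
  unfold Spec_get_left_blocks get_left_blocks get_left_blocks_alt
  cases am with
  | nil => simp
  | cons b t =>
    have hstep : glbStepA (none, []) b = (some (glbCol b), [glbPair b]) := by
      simp [glbStepA, glbCol, glbPair]
    rw [List.foldl_cons, hstep, glb_loop]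
    rw [show ((b :: t).map (fun b => PySem.List.pyGetD b 1 0)) = (b :: t).map glbCol from rfl,
        glb_min_eq]
    have hcol : ∀ x : List Int, PySem.List.pyGetD x 1 0 = glbCol x := fun _ => rfl
    simp only [hcol, List.filter_cons, if_neg (by simp : ¬(b :: t) = [])]
    set M := (t.map glbCol).foldl min (glbCol b) with hMdef
    rw [show (fun b => [PySem.List.pyGetD b 0 0, glbCol b]) = glbPair from rfl]
    by_cases hb : glbCol b = M
    · simp [hb]
    · have hb2 : ¬ M = glbCol b := fun h => hb h.symm
      simp [hb, hb2]
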